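-- pv_equiv track=rewrite | github.com/jtthachil/parsing | android_parser.py | android_app_name_conversion
-- ===== SOURCE A (Python) =====
-- def android_app_name_conversion(app_name_to_change) :
--     changed_name = ''
--     for original_character in app_name_to_change :
--         if original_character.isalnum() :
--             changed_name = changed_name + original_character
--         elif original_character.isalnum() == False :
--             if len(changed_name) != 0 and changed_name[-1] != '-' :
--                 changed_name = changed_name + '-'
--     return changed_name
-- ===== SOURCE B (Python) =====
-- from itertools import groupby
--
-- def android_app_name_conversion(app_name_to_change):
--     parts = []
--     for is_alnum, group in groupby(app_name_to_change, key=lambda c: c.isalnum()):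
--         if is_alnum:
--             parts.append(''.join(group))
--         elif parts:
--             parts.append('-')
--     return ''.join(parts)
-- ===== Notes on version B (the rewrite author's own statement) =====
-- stated objective: idiomatic
-- what changed: B walks maximal runs of consecutive characters via itertools.groupby, emitting each alphanumeric run whole and one hyphen per non-alphanumeric run (skipped while the output is still empty), instead of A's per-character string concatenation with a last-character sentinel check.
import Mathlib
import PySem

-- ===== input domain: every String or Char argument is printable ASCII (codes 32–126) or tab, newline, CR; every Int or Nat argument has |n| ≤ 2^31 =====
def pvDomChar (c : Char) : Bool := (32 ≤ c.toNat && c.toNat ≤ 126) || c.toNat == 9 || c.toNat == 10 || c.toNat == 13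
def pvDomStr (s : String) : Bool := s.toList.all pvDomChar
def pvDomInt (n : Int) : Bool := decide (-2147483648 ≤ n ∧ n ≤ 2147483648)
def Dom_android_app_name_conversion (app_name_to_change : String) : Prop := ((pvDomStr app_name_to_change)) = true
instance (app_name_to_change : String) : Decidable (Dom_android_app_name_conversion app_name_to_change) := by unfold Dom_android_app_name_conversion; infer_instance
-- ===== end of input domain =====

-- ===== PORT A =====
-- B rewrites A's per-character sentinel loop as run-based emission over maximal
-- alphanumeric / non-alphanumeric runs (itertools.groupby); same return value, objective: idiomatic.

-- loop body of A: append alnum chars; otherwise append '-' unless empty or already ending in '-'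
def pvStepA (changed_name : List Char) (original_character : Char) : List Char :=
  if PySem.Chars.isalnum original_character then changed_name ++ [original_character]
  else if changed_name.length ≠ 0 ∧ PySem.List.pyGet? changed_name (-1) ≠ some '-' then
    changed_name ++ ['-']
  else changed_name

def android_app_name_conversion (app_name_to_change : String) : String :=
  String.mk (app_name_to_change.toList.foldl pvStepA [])

-- ===== PORT B =====
-- groupby: maximal runs of equal key (isalnum), in order
def pvRuns (l : List Char) : List (Bool × List Char) :=
  match l with
  | [] => []
  | c :: cs =>
    let k := PySem.Chars.isalnum c
    (k, c :: cs.takeWhile (fun d => PySem.Chars.isalnum d == k)) ::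
      pvRuns (cs.dropWhile (fun d => PySem.Chars.isalnum d == k))
termination_by l.length
decreasing_by
  simpa using Nat.lt_succ_of_le (List.length_dropWhile_le _ cs)

-- loop body of B: emit an alnum run whole; one '-' per other run if parts is non-empty
def pvEmitB (parts : List (List Char)) (run : Bool × List Char) : List (List Char) :=
  if run.1 then parts ++ [run.2]
  else if parts ≠ [] then parts ++ [['-']]
  else parts

def android_app_name_conversion_alt (app_name_to_change : String) : String :=
  String.mk (((pvRuns app_name_to_change.toList).foldl pvEmitB []).flatten)

-- ===== PRECONDITION & SPEC =====
def Spec_android_app_name_conversion (app_name_to_change : String) (out : String) : Prop := out = android_app_name_conversion_alt app_name_to_change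
instance (app_name_to_change : String) (out : String) : Decidable (Spec_android_app_name_conversion app_name_to_change out) := by unfold Spec_android_app_name_conversion; infer_instance

-- ===== CLAIM (what is proved, stated in full; the proofs are below) =====
def Claim_equal_android_app_name_conversion : Prop := ∀ (app_name_to_change : String), Dom_android_app_name_conversion app_name_to_change → Spec_android_app_name_conversion app_name_to_change (android_app_name_conversion app_name_to_change)

-- ===== LEMMAS AND PROOFS =====

theorem pvPyGet_last (acc : List Char) (h : acc ≠ []) :
    PySem.List.pyGet? acc (-1) = acc.getLast? := by
  have hl : 0 < acc.length := List.length_pos_iff.mpr h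
  simp [PySem.List.pyGet?, PySem.List.pyIdx?, List.getLast?_eq_getElem?]
  rw [if_pos (show 1 ≤ acc.length by omega)]
  simp

theorem pvStepA_alnum (acc : List Char) (c : Char) (h : PySem.Chars.isalnum c = true) :
    pvStepA acc c = acc ++ [c] := by simp [pvStepA, h]

-- an all-alphanumeric run is appended wholesale
theorem pvRunAlnum (l : List Char) (h : ∀ c ∈ l, PySem.Chars.isalnum c = true) :
    ∀ acc, l.foldl pvStepA acc = acc ++ l := by
  induction l with
  | nil => simp
  | cons c cs ih =>
    intro acc
    rw [List.foldl_cons, pvStepA_alnum _ _ (h c (by simp)),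
      ih (fun d hd => h d (by simp [hd]))]
    simp

-- a non-alphanumeric run leaves an empty accumulator empty
theorem pvRunNon_nil (l : List Char) (h : ∀ c ∈ l, PySem.Chars.isalnum c = false) :
    l.foldl pvStepA [] = [] := by
  induction l with
  | nil => rfl
  | cons c cs ih =>
    rw [List.foldl_cons]
    have : pvStepA [] c = [] := by simp [pvStepA, h c (by simp)]
    rw [this]; exact ih (fun d hd => h d (by simp [hd]))

-- a non-alphanumeric run does nothing once the accumulator ends in '-'
theorem pvRunNon_dash (l : List Char) (h : ∀ c ∈ l, PySem.Chars.isalnum c = false) :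
    ∀ acc, acc.getLast? = some '-' → l.foldl pvStepA acc = acc := by
  induction l with
  | nil => intro acc _; rfl
  | cons c cs ih =>
    intro acc hd
    have hne : acc ≠ [] := by intro e; simp [e] at hd
    have : pvStepA acc c = acc := by
      simp [pvStepA, h c (by simp), pvPyGet_last acc hne, hd]
    rw [List.foldl_cons, this]
    exact ih (fun d hdm => h d (by simp [hdm])) acc hd

theorem pvDashNotAlnum : PySem.Chars.isalnum '-' = false := by decide

-- main invariant: A's fold from the flattened parts equals B's run-wise emission,
-- provided parts holds no empty piece and a trailing '-' is followed by an alnum char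
theorem pvMain (l : List Char) :
    ∀ parts : List (List Char), (∀ p ∈ parts, p ≠ []) →
    (parts.flatten.getLast? = some '-' →
      ∃ d t, l = d :: t ∧ PySem.Chars.isalnum d = true) →
    l.foldl pvStepA parts.flatten = ((pvRuns l).foldl pvEmitB parts).flatten := by
  induction l using pvRuns.induct with
  | case1 => intro parts _ _; simp [pvRuns]
  | case2 c cs k ih =>
    intro parts hinv hdash
    have hkdef : k = PySem.Chars.isalnum c := rfl
    rw [hkdef] at ih
    set g := cs.takeWhile (fun d => PySem.Chars.isalnum d == PySem.Chars.isalnum c) with hg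
    set rest := cs.dropWhile (fun d => PySem.Chars.isalnum d == PySem.Chars.isalnum c) with hr
    have hsplit : g ++ rest = cs := by
      rw [hg, hr]; exact List.takeWhile_append_dropWhile
    have hlhs : (c :: cs).foldl pvStepA parts.flatten
        = rest.foldl pvStepA ((c :: g).foldl pvStepA parts.flatten) := by
      conv_lhs => rw [show c :: cs = (c :: g) ++ rest by rw [List.cons_append, hsplit]]
      rw [List.foldl_append]
    have hrest_head : ∀ d t, rest = d :: t →
        (PySem.Chars.isalnum d == PySem.Chars.isalnum c) = false := by
      intro d t hdt
      have hdw : cs.dropWhile (fun d => PySem.Chars.isalnum d == PySem.Chars.isalnum c)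
          = d :: t := by rw [← hr]; exact hdt
      have := List.head_dropWhile_not
        (fun d => PySem.Chars.isalnum d == PySem.Chars.isalnum c) (l := cs) (by simp [hdw])
      simpa [hdw] using this
    have hruns : pvRuns (c :: cs)
        = (PySem.Chars.isalnum c, c :: g) :: pvRuns rest := by
      rw [pvRuns]
    rw [hruns]
    by_cases hk : PySem.Chars.isalnum c = true
    · -- alphanumeric run
      have hcg : ∀ d ∈ c :: g, PySem.Chars.isalnum d = true := by
        intro d hd
        rcases List.mem_cons.mp hd with h | h
        · subst h; exact hk
        · have := List.mem_takeWhile_imp (l := cs) (hg ▸ h)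
          simpa [hk] using this
      have hne : (c :: g) ≠ [] := by simp
      rw [hlhs, pvRunAlnum _ hcg, List.foldl_cons]
      have hemit : pvEmitB parts (PySem.Chars.isalnum c, c :: g) = parts ++ [c :: g] := by
        simp [pvEmitB, hk]
      rw [hemit, ← ih (parts ++ [c :: g])
        (by intro p hp; rcases List.mem_append.mp hp with h | h
            · exact hinv p h
            · simp at h; simp [h])
        (by intro hlast
            rw [List.flatten_append, List.flatten_cons, List.flatten_nil,
              List.append_nil, List.getLast?_append_of_ne_nil (l₁ := parts.flatten) hne] at hlast
            have hmem : '-' ∈ c :: g := List.mem_of_getLast? hlast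
            exact absurd (hcg '-' hmem) (by simp [pvDashNotAlnum]))]
      simp
    · -- non-alphanumeric run
      have hkf : PySem.Chars.isalnum c = false := by simpa using hk
      have hcg : ∀ d ∈ c :: g, PySem.Chars.isalnum d = false := by
        intro d hd
        rcases List.mem_cons.mp hd with h | h
        · subst h; exact hkf
        · have := List.mem_takeWhile_imp (l := cs) (hg ▸ h)
          simpa [hkf] using this
      have hnd : parts.flatten.getLast? ≠ some '-' := by
        intro hlast
        obtain ⟨d, t, hdt, hda⟩ := hdash hlast
        have hdc : d = c := by injection hdt with h1 _; exact h1.symm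
        rw [hdc, hkf] at hda
        exact Bool.false_ne_true hda
      by_cases hp : parts = []
      · subst hp
        rw [hlhs]
        simp only [List.flatten_nil] at *
        rw [pvRunNon_nil _ hcg, List.foldl_cons]
        have hemit : pvEmitB [] (PySem.Chars.isalnum c, c :: g) = [] := by
          simp [pvEmitB, hkf]
        rw [hemit]
        exact ih [] (by simp) (by simp)
      · have hfne : parts.flatten ≠ [] := by
          intro he
          rcases parts with _ | ⟨p, ps⟩
          · exact hp rfl
          · have : p = [] := by
              have := List.flatten_cons (l := p) (L := ps) ▸ he
              exact (List.append_eq_nil_iff.mp this).1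
            exact hinv p (by simp) this
        have hlen : parts.flatten.length ≠ 0 := fun h0 => hfne (List.length_eq_zero_iff.mp h0)
        have hstep1 : pvStepA parts.flatten c = parts.flatten ++ ['-'] := by
          rw [pvStepA, if_neg (by simp [hkf]),
            if_pos ⟨hlen, by rw [pvPyGet_last _ hfne]; exact hnd⟩]
        have hrun : (c :: g).foldl pvStepA parts.flatten = parts.flatten ++ ['-'] := by
          rw [List.foldl_cons, hstep1]
          exact pvRunNon_dash g (fun d hd => hcg d (by simp [hd])) _ (by simp)
        have hemit : pvEmitB parts (PySem.Chars.isalnum c, c :: g) = parts ++ [['-']] := by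
          simp [pvEmitB, hkf, hp]
        rcases hcase : rest with _ | ⟨d, t⟩
        · rw [hlhs, hcase, hrun, List.foldl_cons, hemit]
          simp [pvRuns]
        · rw [hcase] at hlhs ih hrest_head
          rw [hlhs, hrun]
          conv_rhs => rw [List.foldl_cons, hemit]
          rw [← ih (parts ++ [['-']])
            (by intro p hpm; rcases List.mem_append.mp hpm with h | h
                · exact hinv p h
                · simp at h; simp [h])
            (by intro _
                exact ⟨d, t, rfl, by
                  have := hrest_head d t rfl
                  simpa [hkf] using this⟩)]
          simp

-- ===== VERDICT (by name: the statement is the Claim_ definition above) =====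
theorem android_app_name_conversion_spec : Claim_equal_android_app_name_conversion := by
  intro s _
  unfold Spec_android_app_name_conversion android_app_name_conversion android_app_name_conversion_alt
  have := pvMain s.toList [] (by simp) (by simp)
  simpa using congrArg String.mk this
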